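-- pv_equiv track=rewrite | github.com/libardia/ProjectEuler | P017 - Number letter counts/main.py | lettersin
-- ===== SOURCE A (Python) =====
-- onetoninewords = ["", "one", "two", "three", "four", "five", "six", "seven", "eight", "nine"]
--
-- onetonine      = [ 0,  3,     3,     5,       4,      4,      3,     5,       5,       4    ]
--
-- tentonineteenwords = ["ten", "eleven", "twelve", "thirteen", "fourteen", "fifteen", "sixteen", "seventeen", "eighteen", "nineteen"]
--
-- tentonineteen      = [ 3,     6,        6,        8,          8,          7,         7,         9,           8,          8        ]
--
-- twentytoninetywords = ["twenty", "thirty", "forty", "fifty", "sixty", "seventy", "eighty", "ninety"]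
--
-- twentytoninety      = [ 6,        6,        5,       5,       5,       7,         6,        6      ]
--
-- hundredword = "hundred"
--
-- hundred = 7
--
-- powersofthousandwords = ["thousand", "million", "billion", "trillion"]
--
-- powersofthousand      = [ 8,          7,         7,         8        ]
--
-- def lettersin(x, useand = True):
--     xint = int(x)
--     xstr = str(xint)
--
--     if xint == 0: # is exactly zero
--         return 4, "zero"
--     elif xint < 10: # One digit and not zero
--         return onetonine[xint], onetoninewords[xint]
--     elif xint < 20: # Two digits and <20
--         return tentonineteen[xint-10], tentonineteenwords[xint-10]
--     elif xint < 100: # Two digits and >=20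
--         a = int(xstr[0])-2
--         b = int(xstr[1])
--         return \
--             twentytoninety[a] + onetonine[b], \
--             twentytoninetywords[a] + ("" if onetonine[b] == 0 else "-" + onetoninewords[b])
--     elif xint < 1000: # Three digits
--         a = lettersin(xstr[0])
--         b = lettersin(xstr[1:])
--         bzero = b[1] == "zero"
--
--         if bzero:
--             return \
--                 a[0] + hundred, \
--                 a[1] + " " + hundredword
--         else:
--             return \
--                 a[0] + hundred + (3 if useand else 0) + b[0], \
--                 a[1] + " " + hundredword + (" and " if useand else " ") + b[1]
--     else: # >=1000
--         if len(xstr) % 3 != 0: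
--             xstr = ("0" * (3 - (len(xstr) % 3))) + xstr
--         mag = (len(xstr) // 3) - 2
--         a = lettersin(xstr[:3], False)
--         b = lettersin(xstr[3:], mag == 0)
--         bzero = b[1] == "zero"
--         return \
--             a[0] + powersofthousand[mag] + (0 if bzero else b[0]), \
--             a[1] + " " + powersofthousandwords[mag] + ("" if bzero else ", " + b[1])
-- ===== SOURCE B (Python) =====
-- ONES = [""] + "one two three four five six seven eight nine".split()
-- TEENS = "ten eleven twelve thirteen fourteen fifteen sixteen seventeen eighteen nineteen".split()
-- TENS = "twenty thirty forty fifty sixty seventy eighty ninety".split()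
-- POWERS = "thousand million billion trillion".split()
--
--
-- def _small(r):
--     # words for 1..99
--     if r < 10:
--         return ONES[r]
--     if r < 20:
--         return TEENS[r - 10]
--     t, o = divmod(r, 10)
--     return TENS[t - 2] + ("-" + ONES[o] if o else "")
--
--
-- def _group(g, useand):
--     # words for 1..999
--     if g < 100:
--         return _small(g)
--     h, r = divmod(g, 100)
--     w = ONES[h] + " hundred"
--     if r:
--         w += (" and " if useand else " ") + _small(r)
--     return w
--
--
-- def lettersin(x, useand=True):
--     n = int(x)
--     if n < 0:
--         raise ValueError("lettersin: negative number")
--     if n == 0: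
--         return 4, "zero"
--     groups = []
--     while n:
--         n, g = divmod(n, 1000)
--         groups.append(g)
--     # the units group takes "and" iff the thousands group is nonzero, or the
--     # whole number is below 1000 and the caller asked for it
--     and_units = groups[1] != 0 if len(groups) > 1 else useand
--     parts = []
--     for mag, g in enumerate(groups):
--         if g:
--             w = _group(g, and_units if mag == 0 else False)
--             if mag:
--                 w += " " + POWERS[mag - 1]
--             parts.insert(0, w)
--     word = ", ".join(parts)
--     return sum(c.isalpha() for c in word), word
-- ===== Notes on version B (the rewrite author's own statement) =====
-- stated objective: simpler
-- what changed: B builds only the word string in a single loop over the number's base-1000 groups (explicit group list, enumerate with a magnitude index, word tables built by splitting one literal) instead of A's recursive splitting of the zero-padded decimal string, and recovers the letter count as sum(c.isalpha()) over the finished word, dropping all of A's parallel numeric count tables.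
-- outside the precondition, e.g. on lettersin(-5, True): A returns (4, 'five'), B raises ValueError; on lettersin(-12, True): A raises IndexError, B raises ValueError
import Mathlib
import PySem

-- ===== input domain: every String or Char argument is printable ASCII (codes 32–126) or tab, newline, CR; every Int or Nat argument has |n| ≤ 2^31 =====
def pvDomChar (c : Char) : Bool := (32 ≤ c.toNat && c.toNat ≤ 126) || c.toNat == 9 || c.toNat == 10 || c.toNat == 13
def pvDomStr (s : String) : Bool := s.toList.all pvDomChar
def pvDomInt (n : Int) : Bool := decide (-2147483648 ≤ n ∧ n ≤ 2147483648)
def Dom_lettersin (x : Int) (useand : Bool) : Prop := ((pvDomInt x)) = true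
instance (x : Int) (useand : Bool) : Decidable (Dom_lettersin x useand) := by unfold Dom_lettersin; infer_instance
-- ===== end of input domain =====

-- B spells the number with a single loop over its base-1000 groups (explicit group list and
-- magnitude index) instead of A's recursive split of the zero-padded decimal string, and reads
-- the letter count off the finished word, dropping A's parallel numeric count tables; objective: simpler.

-- ===== PORT A =====
-- A-side word/count tables (Python list literals; the words are ASCII)
def onetoninewordsA : List (List Char) := [[], ['o', 'n', 'e'], ['t', 'w', 'o'], ['t', 'h', 'r', 'e', 'e'], ['f', 'o', 'u', 'r'], ['f', 'i', 'v', 'e'], ['s', 'i', 'x'], ['s', 'e', 'v', 'e', 'n'], ['e', 'i', 'g', 'h', 't'], ['n', 'i', 'n', 'e']]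
def onetonineA : List Int := [0, 3, 3, 5, 4, 4, 3, 5, 5, 4]
def tentonineteenwordsA : List (List Char) := [['t', 'e', 'n'], ['e', 'l', 'e', 'v', 'e', 'n'], ['t', 'w', 'e', 'l', 'v', 'e'], ['t', 'h', 'i', 'r', 't', 'e', 'e', 'n'], ['f', 'o', 'u', 'r', 't', 'e', 'e', 'n'], ['f', 'i', 'f', 't', 'e', 'e', 'n'], ['s', 'i', 'x', 't', 'e', 'e', 'n'], ['s', 'e', 'v', 'e', 'n', 't', 'e', 'e', 'n'], ['e', 'i', 'g', 'h', 't', 'e', 'e', 'n'], ['n', 'i', 'n', 'e', 't', 'e', 'e', 'n']]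
def tentonineteenA : List Int := [3, 6, 6, 8, 8, 7, 7, 9, 8, 8]
def twentytoninetywordsA : List (List Char) := [['t', 'w', 'e', 'n', 't', 'y'], ['t', 'h', 'i', 'r', 't', 'y'], ['f', 'o', 'r', 't', 'y'], ['f', 'i', 'f', 't', 'y'], ['s', 'i', 'x', 't', 'y'], ['s', 'e', 'v', 'e', 'n', 't', 'y'], ['e', 'i', 'g', 'h', 't', 'y'], ['n', 'i', 'n', 'e', 't', 'y']]
def twentytoninetyA : List Int := [6, 6, 5, 5, 5, 7, 6, 6]
def hundredwordA : List Char := ['h', 'u', 'n', 'd', 'r', 'e', 'd']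
def hundredA : Int := 7
def powersofthousandwordsA : List (List Char) := [['t', 'h', 'o', 'u', 's', 'a', 'n', 'd'], ['m', 'i', 'l', 'l', 'i', 'o', 'n'], ['b', 'i', 'l', 'l', 'i', 'o', 'n'], ['t', 'r', 'i', 'l', 'l', 'i', 'o', 'n']]
def powersofthousandA : List Int := [8, 7, 7, 8]

-- Python's int(s). In A the recursive calls pass slices of str(xint) with xint ≥ 10, so every
-- string reaching int(s) is a nonempty run of ASCII digits; on exactly those inputs int(s) is
-- this fold (no sign/whitespace/underscore cases can arise), so this hand port is exact here.
def pyIntDigits (cs : List Char) : Int :=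
  cs.foldl (fun a c => a * 10 + ((c.toNat : Int) - 48)) 0

-- The recursion of lettersin, step for step.  Python recurses on substrings of str(xint);
-- since the body only uses int(x) and str(int(x)), the recursive calls pass int(slice)
-- directly.  The Nat fuel is only a structural-termination guard: the depth is about one
-- level per 3 digits, so fuel 32 is never exhausted on any admitted input.
def lettersinFuel : Nat → Int → Bool → Int × List Char
  | 0, _, _ => (0, [])
  | f + 1, x, useand =>
    let xint : Int := x
    let xstr : List Char := PySem.Int.toChars xint
    if xint = 0 then (4, ['z', 'e', 'r', 'o'])
    else if xint < 10 then
      match PySem.List.pyGet? onetonineA xint, PySem.List.pyGet? onetoninewordsA xint with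
      | some n, some w => (n, w)
      | _, _ => (0, [])                      -- IndexError (x ≤ -11): outside Pre_
    else if xint < 20 then
      match PySem.List.pyGet? tentonineteenA (xint - 10), PySem.List.pyGet? tentonineteenwordsA (xint - 10) with
      | some n, some w => (n, w)
      | _, _ => (0, [])
    else if xint < 100 then
      match PySem.List.pyGet? xstr 0, PySem.List.pyGet? xstr 1 with
      | some c0, some c1 =>
        let a := pyIntDigits [c0] - 2
        let b := pyIntDigits [c1]
        match PySem.List.pyGet? twentytoninetyA a, PySem.List.pyGet? onetonineA b,
              PySem.List.pyGet? twentytoninetywordsA a, PySem.List.pyGet? onetoninewordsA b with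
        | some na, some nb, some wa, some wb =>
          (na + nb, wa ++ (if nb = 0 then [] else '-' :: wb))
        | _, _, _, _ => (0, [])
      | _, _ => (0, [])
    else if xint < 1000 then
      match PySem.List.pyGet? xstr 0 with
      | some c0 =>
        let a := lettersinFuel f (pyIntDigits [c0]) true
        let b := lettersinFuel f (pyIntDigits (PySem.List.slice xstr (some 1) none)) true
        let bzero := b.2 = ['z', 'e', 'r', 'o']
        if bzero then (a.1 + hundredA, a.2 ++ ' ' :: hundredwordA)
        else (a.1 + hundredA + (if useand then 3 else 0) + b.1,
              a.2 ++ ' ' :: hundredwordA ++ (if useand then [' ', 'a', 'n', 'd', ' '] else [' ']) ++ b.2)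
      | none => (0, [])
    else
      let xstr2 := if PySem.Int.mod (xstr.length : Int) 3 ≠ 0
        then PySem.List.pyRepeat ['0'] (3 - PySem.Int.mod (xstr.length : Int) 3) ++ xstr
        else xstr
      let mag := PySem.Int.floordiv (xstr2.length : Int) 3 - 2
      let a := lettersinFuel f (pyIntDigits (PySem.List.slice xstr2 none (some 3))) false
      let b := lettersinFuel f (pyIntDigits (PySem.List.slice xstr2 (some 3) none)) (decide (mag = 0))
      let bzero := b.2 = ['z', 'e', 'r', 'o']
      match PySem.List.pyGet? powersofthousandA mag, PySem.List.pyGet? powersofthousandwordsA mag with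
      | some pn, some pw =>
        (a.1 + pn + (if bzero then 0 else b.1),
         a.2 ++ ' ' :: pw ++ (if bzero then [] else ',' :: ' ' :: b.2))
      | _, _ => (0, [])                      -- IndexError (x ≥ 10^15): outside Dom

def lettersin (x : Int) (useand : Bool) : Int × String :=
  let r := lettersinFuel 32 x useand
  (r.1, String.ofList r.2)

-- ===== PORT B =====
-- B-side word tables, built by splitting one space-separated literal each (Source B)
def onesWB : List (List Char) := [[]] ++ PySem.Chars.split₀ "one two three four five six seven eight nine".toList
def teensWB : List (List Char) := PySem.Chars.split₀ "ten eleven twelve thirteen fourteen fifteen sixteen seventeen eighteen nineteen".toList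
def tensWB : List (List Char) := PySem.Chars.split₀ "twenty thirty forty fifty sixty seventy eighty ninety".toList
def powersWB : List (List Char) := PySem.Chars.split₀ "thousand million billion trillion".toList

-- _small(r): words for 1..99
def smallB (r : Int) : List Char :=
  if r < 10 then PySem.List.pyGetD onesWB r []
  else if r < 20 then PySem.List.pyGetD teensWB (r - 10) []
  else
    let t := PySem.Int.floordiv r 10
    let o := PySem.Int.mod r 10
    PySem.List.pyGetD tensWB (t - 2) [] ++
      (if o ≠ 0 then '-' :: PySem.List.pyGetD onesWB o [] else [])

-- _group(g, useand): words for 1..999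
def groupB (g : Int) (useand : Bool) : List Char :=
  if g < 100 then smallB g
  else
    let h := PySem.Int.floordiv g 100
    let r := PySem.Int.mod g 100
    let w := PySem.List.pyGetD onesWB h [] ++ " hundred".toList
    if r ≠ 0 then w ++ (if useand then " and ".toList else [' ']) ++ smallB r else w

-- while n: n, g = divmod(n, 1000); groups.append(g)
-- (the Nat fuel is only a structural-termination guard: the loop runs once per 3 digits,
-- so fuel 32 is never exhausted on any admitted input)
def groupsLoopB : Nat → Int → List Int → List Int
  | 0, _, groups => groups
  | f + 1, n, groups =>
    if n ≠ 0 then groupsLoopB f (PySem.Int.floordiv n 1000) (groups ++ [PySem.Int.mod n 1000])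
    else groups

def lettersin_alt (x : Int) (useand : Bool) : Int × String :=
  let n : Int := x
  if n < 0 then (0, "")                     -- raise ValueError: outside Pre_
  else if n = 0 then (4, "zero")
  else
    let groups := groupsLoopB 32 n []
    let and_units := if 1 < groups.length then PySem.List.pyGetD groups 1 0 ≠ 0 else useand
    let parts := (PySem.List.enumerate groups 0).foldl
      (fun parts p =>
        if p.2 ≠ 0 then
          let w := groupB p.2 (if p.1 = 0 then and_units else false)
          let w := if p.1 ≠ 0 then w ++ ' ' :: PySem.List.pyGetD powersWB (p.1 - 1) [] else w
          PySem.List.insert parts 0 w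
        else parts) []
    let word := PySem.Chars.join [',', ' '] parts
    ((word.map (fun c => if PySem.Chars.isalpha c then (1 : Int) else 0)).sum, String.ofList word)

-- ===== PRECONDITION & SPEC =====
-- Pre_ excludes negative x only: there A raises IndexError for x ≤ -11 and, for -10 ≤ x ≤ -1,
-- returns accidental negative-index wraparound values (e.g. lettersin(-5) = (4, 'five')) that
-- no caller of a number-spelling function would specify; B raises ValueError on every negative.
def Pre_lettersin (x : Int) (useand : Bool) : Prop := 0 ≤ x
instance (x : Int) (useand : Bool) : Decidable (Pre_lettersin x useand) := by unfold Pre_lettersin; infer_instance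

def pvWitness_lettersin : Int × Bool := (1234, true)

def Spec_lettersin (x : Int) (useand : Bool) (out : Int × String) : Prop := out = lettersin_alt x useand
instance (x : Int) (useand : Bool) (out : Int × String) : Decidable (Spec_lettersin x useand out) := by unfold Spec_lettersin; infer_instance

-- ===== CLAIM (what is proved, stated in full; the proofs are below) =====
def Claim_equal_lettersin : Prop := ∀ (x : Int) (useand : Bool), Dom_lettersin x useand → Pre_lettersin x useand → Spec_lettersin x useand (lettersin x useand)

-- ===== LEMMAS AND PROOFS =====

-- ===== LEMMAS AND PROOFS =====

-- altChars mirror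
def altChars (x : Int) (u : Bool) : Int × List Char :=
  if x < 0 then (0, [])
  else if x = 0 then (4, ['z','e','r','o'])
  else
    let groups := groupsLoopB 32 x []
    let and_units := if 1 < groups.length then PySem.List.pyGetD groups 1 0 ≠ 0 else u
    let parts := (PySem.List.enumerate groups 0).foldl
      (fun parts p =>
        if p.2 ≠ 0 then
          let w := groupB p.2 (if p.1 = 0 then and_units else false)
          let w := if p.1 ≠ 0 then w ++ ' ' :: PySem.List.pyGetD powersWB (p.1 - 1) [] else w
          PySem.List.insert parts 0 w
        else parts) []
    let word := PySem.Chars.join [',', ' '] parts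
    ((word.map (fun c => if PySem.Chars.isalpha c then (1 : Int) else 0)).sum, word)

theorem tdCore_shift (f : Nat) : ∀ (n : Nat) (l : List Char),
    Nat.toDigitsCore 10 f n l = Nat.toDigitsCore 10 f n [] ++ l := by
  induction f with
  | zero => intro n l; rfl
  | succ f ih =>
    intro n l
    simp only [Nat.toDigitsCore]
    by_cases h : n / 10 = 0
    · simp [h]
    · simp only [h, if_false]
      rw [ih (n / 10) (Nat.digitChar (n % 10) :: l), ih (n / 10) [Nat.digitChar (n % 10)]]
      simp

theorem tdCore_fuel : ∀ (n f f' : Nat), n < f → n < f' →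
    Nat.toDigitsCore 10 f n [] = Nat.toDigitsCore 10 f' n [] := by
  intro n
  induction n using Nat.strong_induction_on with
  | _ n IH =>
    intro f f' hf hf'
    obtain ⟨f1, rfl⟩ : ∃ k, f = k + 1 := ⟨f - 1, by omega⟩
    obtain ⟨f2, rfl⟩ : ∃ k, f' = k + 1 := ⟨f' - 1, by omega⟩
    simp only [Nat.toDigitsCore]
    by_cases h : n / 10 = 0
    · simp [h]
    · simp only [h, if_false]
      rw [tdCore_shift f1, tdCore_shift f2]
      have hlt : n / 10 < n := Nat.div_lt_self (by omega) (by omega)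
      rw [IH (n / 10) hlt f1 f2 (by omega) (by omega)]

theorem D_lt10 {n : Nat} (h : n < 10) : Nat.toDigits 10 n = [Nat.digitChar n] := by
  simp [Nat.toDigits, Nat.toDigitsCore, Nat.div_eq_of_lt h, Nat.mod_eq_of_lt h]

theorem D_step {n : Nat} (h : 10 ≤ n) :
    Nat.toDigits 10 n = Nat.toDigits 10 (n / 10) ++ [Nat.digitChar (n % 10)] := by
  have h0 : n / 10 ≠ 0 := by omega
  have hlt : n / 10 < n := Nat.div_lt_self (by omega) (by omega)
  show Nat.toDigitsCore 10 (n + 1) n [] = _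
  simp only [Nat.toDigitsCore, h0, if_false]
  rw [tdCore_shift n]
  rw [tdCore_fuel (n / 10) n (n / 10 + 1) (by omega) (by omega)]
  rfl

-- every char of str(n) is an ASCII digit
theorem D_digits {n : Nat} : ∀ c ∈ Nat.toDigits 10 n, 48 ≤ c.toNat ∧ c.toNat ≤ 57 := by
  induction n using Nat.strong_induction_on with
  | _ n IH =>
    by_cases h : n < 10
    · rw [D_lt10 h]
      intro c hc
      simp only [List.mem_singleton] at hc
      subst hc
      interval_cases n <;> decide
    · rw [D_step (by omega)]
      intro c hc
      rcases List.mem_append.1 hc with h1 | h1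
      · exact IH (n / 10) (Nat.div_lt_self (by omega) (by omega)) c h1
      · simp only [List.mem_singleton] at h1
        subst h1
        have : n % 10 < 10 := Nat.mod_lt _ (by omega)
        set k := n % 10
        interval_cases k <;> decide

theorem len_D {n : Nat} : (Nat.toDigits 10 n).length = Nat.log 10 n + 1 := by
  induction n using Nat.strong_induction_on with
  | _ n IH =>
    by_cases h : n < 10
    · rw [D_lt10 h]
      have : Nat.log 10 n = 0 := Nat.log_eq_zero_iff.2 (Or.inl h)
      simp [this]
    · rw [D_step (by omega)]
      rw [List.length_append, IH (n / 10) (Nat.div_lt_self (by omega) (by omega))]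
      rw [Nat.log_div_base]
      have : 0 < Nat.log 10 n := Nat.log_pos (by omega) (by omega)
      simp
      omega

-- the Nat value of a big-endian ASCII-digit string
def valN (cs : List Char) : Nat := cs.foldl (fun a c => a * 10 + (c.toNat - 48)) 0

theorem valN_fold (cs : List Char) : ∀ a : Nat,
    cs.foldl (fun a c => a * 10 + (c.toNat - 48)) a = a * 10 ^ cs.length + valN cs := by
  induction cs with
  | nil => intro a; simp [valN]
  | cons c cs ih =>
    intro a
    show cs.foldl _ (a * 10 + (c.toNat - 48)) = _
    rw [ih (a * 10 + (c.toNat - 48))]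
    have : valN (c :: cs) = (c.toNat - 48) * 10 ^ cs.length + valN cs := by
      show cs.foldl _ (0 * 10 + (c.toNat - 48)) = _
      rw [ih (0 * 10 + (c.toNat - 48))]
      ring_nf
    rw [this]
    simp [List.length_cons]
    ring

theorem valN_append (l1 l2 : List Char) :
    valN (l1 ++ l2) = valN l1 * 10 ^ l2.length + valN l2 := by
  show (l1 ++ l2).foldl _ 0 = _
  rw [List.foldl_append, valN_fold l2]
  rfl

theorem valN_digitChar {k : Nat} (h : k < 10) : valN [Nat.digitChar k] = k := by
  interval_cases k <;> decide

theorem valN_D {n : Nat} : valN (Nat.toDigits 10 n) = n := by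
  induction n using Nat.strong_induction_on with
  | _ n IH =>
    by_cases h : n < 10
    · rw [D_lt10 h, valN_digitChar h]
    · rw [D_step (by omega), valN_append, IH (n / 10) (Nat.div_lt_self (by omega) (by omega))]
      have : valN [Nat.digitChar (n % 10)] = n % 10 := valN_digitChar (Nat.mod_lt _ (by omega))
      rw [this]
      simp
      omega

theorem valN_lt (cs : List Char) (h : ∀ c ∈ cs, c.toNat ≤ 57) : valN cs < 10 ^ cs.length := by
  induction cs using List.reverseRecOn with
  | nil => decide
  | append_singleton l c ih =>
    rw [valN_append]
    have h1 : valN l < 10 ^ l.length := ih (fun c hc => h c (List.mem_append_left _ hc))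
    have h2 : c.toNat ≤ 57 := h c (List.mem_append_right _ (List.mem_singleton_self c))
    have h3 : valN [c] ≤ 9 := by
      show 0 * 10 + (c.toNat - 48) ≤ 9
      omega
    simp only [List.length_append, List.length_singleton]
    calc valN l * 10 ^ 1 + valN [c] ≤ (10 ^ l.length - 1) * 10 + 9 := by
          have : valN l ≤ 10 ^ l.length - 1 := by omega
          have := Nat.mul_le_mul_right 10 this
          omega
      _ < 10 ^ (l.length + 1) := by
          have : 0 < 10 ^ l.length := Nat.pow_pos (by omega)
          rw [pow_succ]
          omega

-- bridge: the Int fold in the port equals the Nat value on digit strings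
theorem pyIntDigits_eq_valN (cs : List Char) (h : ∀ c ∈ cs, 48 ≤ c.toNat) :
    pyIntDigits cs = (valN cs : Int) := by
  have gen : ∀ a : Nat, cs.foldl (fun a c => a * 10 + ((c.toNat : Int) - 48)) (a : Int)
      = ((cs.foldl (fun a c => a * 10 + (c.toNat - 48)) a : Nat) : Int) := by
    induction cs with
    | nil => intro a; rfl
    | cons c cs ih =>
      intro a
      have hc : 48 ≤ c.toNat := h c List.mem_cons_self
      have ih' := fun a => ih (fun c hc' => h c (List.mem_cons_of_mem _ hc')) a
      show cs.foldl _ ((a : Int) * 10 + ((c.toNat : Int) - 48)) = _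
      have : (a : Int) * 10 + ((c.toNat : Int) - 48) = ((a * 10 + (c.toNat - 48) : Nat) : Int) := by
        push_cast [Nat.cast_sub hc]
        ring
      rw [this, ih' (a * 10 + (c.toNat - 48))]
      rfl
  exact gen 0

-- split str(n) at position k: quotient and remainder by the matching power of 10
theorem D_split {n k : Nat} (hk : k ≤ (Nat.toDigits 10 n).length) :
    valN ((Nat.toDigits 10 n).take k) = n / 10 ^ ((Nat.toDigits 10 n).length - k) ∧
    valN ((Nat.toDigits 10 n).drop k) = n % 10 ^ ((Nat.toDigits 10 n).length - k) := by
  set ds := Nat.toDigits 10 n with hds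
  have hsplit : ds.take k ++ ds.drop k = ds := List.take_append_drop k ds
  have hlen2 : (ds.drop k).length = ds.length - k := by simp
  have hval : valN (ds.take k) * 10 ^ (ds.length - k) + valN (ds.drop k) = n := by
    rw [← hlen2, ← valN_append, hsplit, hds, valN_D]
  have hlt : valN (ds.drop k) < 10 ^ (ds.length - k) := by
    rw [← hlen2]
    exact valN_lt _ (fun c hc => (D_digits (n := n) c (List.mem_of_mem_drop hc)).2)
  constructor
  · rw [← hval, add_comm, Nat.add_mul_div_right _ _ (Nat.pow_pos (by omega : 0 < 10)),
      Nat.div_eq_of_lt hlt, Nat.zero_add]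
  · rw [← hval, add_comm, Nat.add_mul_mod_self_right, Nat.mod_eq_of_lt hlt]

-- ---- B-side: base-1000 groups ----

theorem groupsLoop_eq : ∀ (f : Nat) (n : Nat) (acc : List Int), n < 1000 ^ f →
    groupsLoopB f (↑n) acc = acc ++ (Nat.digits 1000 n).map (fun g : Nat => (g : Int)) := by
  intro f
  induction f with
  | zero => intro n acc h; interval_cases n; simp [groupsLoopB]
  | succ f ih =>
    intro n acc h
    by_cases h0 : n = 0
    · subst h0; simp [groupsLoopB]
    · have hfd : PySem.Int.floordiv (↑n) 1000 = ((n / 1000 : Nat) : Int) := by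
        exact_mod_cast PySem.Int.floordiv_natCast n 1000
      have hmd : PySem.Int.mod (↑n) 1000 = ((n % 1000 : Nat) : Int) := by
        exact_mod_cast PySem.Int.mod_natCast n 1000
      have hne : (↑n : Int) ≠ 0 := by exact_mod_cast h0
      have step : groupsLoopB (f + 1) (↑n) acc
          = groupsLoopB f (PySem.Int.floordiv (↑n) 1000) (acc ++ [PySem.Int.mod (↑n) 1000]) := by
        simp only [groupsLoopB, hne, ne_eq, not_false_iff, if_true]
      rw [step, hfd, hmd]
      rw [ih (n / 1000) _ (by
        rw [Nat.div_lt_iff_lt_mul (by omega)]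
        calc n < 1000 ^ (f + 1) := h
          _ = 1000 ^ f * 1000 := by rw [pow_succ])]
      rw [show Nat.digits 1000 n = n % 1000 :: Nat.digits 1000 (n / 1000) from
        Nat.digits_def' (b := 1000) (by omega) (Nat.pos_of_ne_zero h0)]
      simp

theorem digits_small {n : Nat} (h0 : 0 < n) (h : n < 1000) : Nat.digits 1000 n = [n] := by
  exact Nat.digits_of_lt 1000 n (by omega) h

-- letter count of a word
def alphaSum (w : List Char) : Int :=
  (w.map (fun c => if PySem.Chars.isalpha c then (1 : Int) else 0)).sum

theorem alphaSum_app (a b : List Char) : alphaSum (a ++ b) = alphaSum a + alphaSum b := by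
  simp [alphaSum]

-- the body of B's parts loop, named for the proofs
def partStep (au : Prop) [Decidable au] (parts : List (List Char)) (p : Int × Int) : List (List Char) :=
  if p.2 ≠ 0 then
    let w := groupB p.2 (if p.1 = 0 then au else false)
    let w := if p.1 ≠ 0 then w ++ ' ' :: PySem.List.pyGetD powersWB (p.1 - 1) [] else w
    PySem.List.insert parts 0 w
  else parts

set_option maxHeartbeats 4000000 in
set_option maxRecDepth 100000 in
theorem noZ : ∀ h : Nat, h < 1000 → 1 ≤ h → ∀ fl : Bool,
    (groupB (↑h) fl).head? ≠ some 'z' ∧ groupB (↑h) fl ≠ [] := by decide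

theorem fold_zeros (au : Prop) [Decidable au] :
    ∀ (k : Nat) (s : Int) (acc : List (List Char)),
      List.foldl (partStep au) acc (PySem.List.enumerate (List.replicate k (0 : Int)) s) = acc := by
  intro k
  induction k with
  | zero => intro s acc; simp [PySem.List.enumerate_nil]
  | succ k ih =>
    intro s acc
    rw [List.replicate_succ, PySem.List.enumerate_cons, List.foldl_cons]
    rw [show partStep au acc (s, (0 : Int)) = acc by simp [partStep]]
    exact ih (s + 1) acc

theorem fold_shape (au : Prop) [Decidable au] :
    ∀ (l : List (Int × Int)) (acc : List (List Char)),
      (∀ p ∈ l, 0 ≤ p.2 ∧ p.2 < 1000) →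
      ∃ new, List.foldl (partStep au) acc l = new ++ acc ∧
        (new = [] ↔ ∀ p ∈ l, p.2 = 0) ∧
        ∀ w ∈ new, w.head? ≠ some 'z' ∧ w ≠ [] := by
  intro l
  induction l with
  | nil => intro acc _; exact ⟨[], by simp⟩
  | cons p l ih =>
    intro acc hb
    have hbp := hb p List.mem_cons_self
    have hbl := fun q hq => hb q (List.mem_cons_of_mem _ hq)
    by_cases hz : p.2 = 0
    · rw [List.foldl_cons, show partStep au acc p = acc by simp [partStep, hz]]
      obtain ⟨new, h1, h2, h3⟩ := ih acc hbl
      exact ⟨new, h1, by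
        constructor
        · intro hn q hq
          rcases List.mem_cons.1 hq with rfl | hq'
          · exact hz
          · exact h2.1 hn q hq'
        · intro hall; exact h2.2 (fun q hq => hall q (List.mem_cons_of_mem _ hq)), h3⟩
    · -- the step prepends a word built from groupB
      set g : Nat := p.2.toNat with hg
      have hpg : p.2 = (g : Int) := by omega
      have hg1 : 1 ≤ g := by omega
      have hg2 : g < 1000 := by omega
      have hnz := noZ g hg2 hg1
      rw [List.foldl_cons]
      have key : ∀ (b : Bool) (tail : List Char),
          (groupB (↑g) b ++ tail).head? ≠ some 'z' ∧ (groupB (↑g) b ++ tail) ≠ [] := by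
        intro b tail
        obtain ⟨hh, hne⟩ := noZ g hg2 hg1 b
        rcases hq : groupB (↑g) b with _ | ⟨c, cs⟩
        · exact absurd hq hne
        · rw [hq] at hh
          simp at hh ⊢
          exact hh
      have key2 : ∀ b : Bool, (groupB (↑g) b).head? ≠ some 'z' ∧ groupB (↑g) b ≠ [] :=
        fun b => noZ g hg2 hg1 b
      have hstep : ∃ w0, partStep au acc p = w0 :: acc ∧ w0.head? ≠ some 'z' ∧ w0 ≠ [] := by
        simp only [partStep, hz, ne_eq, not_false_iff, if_true]
        by_cases hm : p.1 ≠ 0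
        · refine ⟨_, by rw [if_pos hm, PySem.List.insert_zero], ?_, ?_⟩
          · rw [hpg]; exact (key _ _).1
          · rw [hpg]; exact (key _ _).2
        · refine ⟨_, by rw [if_neg hm, PySem.List.insert_zero], ?_, ?_⟩
          · rw [hpg]; exact (key2 _).1
          · rw [hpg]; exact (key2 _).2
      obtain ⟨w0, hs, hw1, hw2⟩ := hstep
      rw [hs]
      obtain ⟨new, h1, h2, h3⟩ := ih (w0 :: acc) hbl
      refine ⟨new ++ [w0], by rw [h1]; simp, ?_, ?_⟩
      · constructor
        · intro hn; simp at hn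
        · intro hall; exact absurd (hall p List.mem_cons_self) hz
      · intro w hw
        rcases List.mem_append.1 hw with hw' | hw'
        · exact h3 w hw'
        · rw [List.mem_singleton.1 hw']; exact ⟨hw1, hw2⟩

-- lettersin_alt in terms of altChars
theorem alt_eq (x : Int) (u : Bool) :
    lettersin_alt x u = ((altChars x u).1, String.ofList (altChars x u).2) := by
  by_cases h0 : x < 0
  · simp only [lettersin_alt, altChars, if_pos h0]
  · by_cases h1 : x = 0
    · subst h1; rfl
    · simp only [lettersin_alt, altChars, h0, h1, if_false]

-- altChars of a one-group number
theorem altSmall (h : Nat) (hlt : h < 1000) (h1 : 1 ≤ h) (fl : Bool) :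
    altChars (↑h) fl = (alphaSum (groupB (↑h) fl), groupB (↑h) fl) := by
  have hx0 : ¬((h : Int) < 0) := by omega
  have hxne : ¬((h : Int) = 0) := by omega
  simp only [altChars, hx0, hxne, if_false]
  rw [groupsLoop_eq 32 h [] (by
    calc h < 1000 ^ 1 := by omega
      _ ≤ 1000 ^ 32 := Nat.pow_le_pow_right (by omega) (by omega))]
  rw [digits_small (by omega) hlt]
  simp only [List.map_cons, List.map_nil, List.nil_append, List.length_cons, List.length_nil]
  rw [show PySem.List.enumerate [(↑h : Int)] 0 = [(0, (↑h : Int))] by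
    rw [PySem.List.enumerate_cons, PySem.List.enumerate_nil]]
  simp only [List.foldl_cons, List.foldl_nil]
  have hne : (↑h : Int) ≠ 0 := by omega
  simp only [hne, ne_eq, not_false_iff, if_true, PySem.List.insert_zero, alphaSum]
  simp [PySem.Chars.join_singleton]

theorem powFacts : ∀ m : Nat, m < 4 →
    PySem.List.pyGetD powersWB (↑m) [] = PySem.List.pyGetD powersofthousandwordsA (↑m) [] ∧
    alphaSum (' ' :: PySem.List.pyGetD powersofthousandwordsA (↑m) []) = PySem.List.pyGetD powersofthousandA (↑m) 0 := by
  decide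

theorem sepAlpha : alphaSum [',', ' '] = 0 := by decide

theorem enum_snd_mem {l : List Int} {s : Int} {p : Int × Int} (h : p ∈ PySem.List.enumerate l s) :
    p.2 ∈ l := by
  obtain ⟨k, hk, rfl⟩ := (PySem.List.mem_enumerate_iff l s p).1 h
  exact List.getElem_mem hk

-- altChars of a positive number, unfolded to the groups fold
theorem altChars_shape (r : Nat) (fl : Bool) (h1 : 1 ≤ r) (hlt : r < 1000 ^ 32) :
    altChars (↑r) fl =
      (alphaSum (PySem.Chars.join [',', ' ']
         (List.foldl (partStep (if 1 < ((Nat.digits 1000 r).map (fun g : Nat => (g : Int))).length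
            then PySem.List.pyGetD ((Nat.digits 1000 r).map (fun g : Nat => (g : Int))) 1 0 ≠ 0
            else (fl = true))) []
           (PySem.List.enumerate ((Nat.digits 1000 r).map (fun g : Nat => (g : Int))) 0))),
       PySem.Chars.join [',', ' ']
         (List.foldl (partStep (if 1 < ((Nat.digits 1000 r).map (fun g : Nat => (g : Int))).length
            then PySem.List.pyGetD ((Nat.digits 1000 r).map (fun g : Nat => (g : Int))) 1 0 ≠ 0
            else (fl = true))) []
           (PySem.List.enumerate ((Nat.digits 1000 r).map (fun g : Nat => (g : Int))) 0))) := by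
  have hx0 : ¬((r : Int) < 0) := by omega
  have hxne : ¬((r : Int) = 0) := by omega
  simp only [altChars, hx0, hxne, if_false]
  rw [groupsLoop_eq 32 r [] hlt]
  rfl

theorem partStep_big (au : Prop) [inst : Decidable au] (parts : List (List Char)) (mag : Nat)
    (g : Int) (hmag : 1 ≤ mag) (hg : g ≠ 0) :
    partStep au parts ((↑mag : Int), g)
      = (groupB g false ++ ' ' :: PySem.List.pyGetD powersWB ((↑mag : Int) - 1) []) :: parts := by
  simp [partStep, hg, show ¬(mag = 0) from by omega, PySem.List.insert_zero]

theorem partStep_congr (au au' : Prop) [Decidable au] [Decidable au'] (h : au ↔ au') :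
    ∀ (l : List (Int × Int)) (acc : List (List Char)),
      List.foldl (partStep au) acc l = List.foldl (partStep au') acc l := by
  have hstep : ∀ acc p, partStep au acc p = partStep au' acc p := by
    intro acc p
    simp only [partStep, decide_eq_decide.2 h]
  intro l
  induction l with
  | nil => intro acc; rfl
  | cons p l ih => intro acc; rw [List.foldl_cons, List.foldl_cons, hstep, ih]

theorem join_ne_zero {q : List Char} {qs : List (List Char)} (hq : q ≠ [])
    (hz : q.head? ≠ some 'z') :
    PySem.Chars.join [',', ' '] (q :: qs) ≠ ['z', 'e', 'r', 'o'] := by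
  rcases q with _ | ⟨c, cs⟩
  · exact absurd rfl hq
  · have hc : c ≠ 'z' := by simpa using hz
    cases qs with
    | nil =>
      rw [PySem.Chars.join_singleton]
      intro h
      injection h with h1 _
      exact hc h1
    | cons q2 qs =>
      rw [PySem.Chars.join_cons_cons]
      intro h
      simp only [List.cons_append] at h
      injection h with h1 _
      exact hc h1

theorem altZero : ∀ fl : Bool, altChars 0 fl = (4, ['z', 'e', 'r', 'o']) := by decide

theorem Hbig (m hi rest : Nat) (u : Bool) (hm : m ≤ 2) (h1 : 1 ≤ hi) (h2 : hi < 1000)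
    (h3 : rest < 1000 ^ (m + 1)) :
    ((altChars (↑hi) false).1 + PySem.List.pyGetD powersofthousandA (↑m) 0 +
        (if (altChars (↑rest) (decide (m = 0))).2 = ['z', 'e', 'r', 'o'] then 0
         else (altChars (↑rest) (decide (m = 0))).1),
     (altChars (↑hi) false).2 ++ ' ' :: PySem.List.pyGetD powersofthousandwordsA (↑m) [] ++
        (if (altChars (↑rest) (decide (m = 0))).2 = ['z', 'e', 'r', 'o'] then []
         else ',' :: ' ' :: (altChars (↑rest) (decide (m = 0))).2))
    = altChars (↑(rest + 1000 ^ (m + 1) * hi)) u := by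
  have hpow := powFacts m (by omega)
  have hA := altSmall hi h2 h1 false
  -- digits of the combined number
  have hL : (Nat.digits 1000 rest).length ≤ m + 1 :=
    (Nat.digits_length_le_iff (by norm_num) rest).2 h3
  set L := (Nat.digits 1000 rest).length with hLdef
  set k := m + 1 - L with hkdef
  have hdig : Nat.digits 1000 (rest + 1000 ^ (m + 1) * hi)
      = (Nat.digits 1000 rest ++ List.replicate k 0) ++ [hi] := by
    have hstep := Nat.digits_append_zeroes_append_digits (b := 1000) (k := k) (m := hi)
      (n := rest) (by norm_num) (by omega)
    rw [digits_small (by omega) h2] at hstep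
    rw [show L + k = m + 1 from by omega] at hstep
    rw [← hstep]
  have hx1 : 1 ≤ rest + 1000 ^ (m + 1) * hi := by
    have : 0 < 1000 ^ (m + 1) := Nat.pow_pos (by omega)
    nlinarith
  have hx32 : rest + 1000 ^ (m + 1) * hi < 1000 ^ 32 := by
    have hp : 0 < 1000 ^ (m + 1) := Nat.pow_pos (by omega)
    have step : rest + 1000 ^ (m + 1) * hi < 1000 ^ (m + 2) := by
      have h4 : rest + 1000 ^ (m + 1) * hi < 1000 ^ (m + 1) * (hi + 1) := by nlinarith
      calc rest + 1000 ^ (m + 1) * hi < 1000 ^ (m + 1) * (hi + 1) := h4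
        _ ≤ 1000 ^ (m + 1) * 1000 := Nat.mul_le_mul_left _ (by omega)
        _ = 1000 ^ (m + 2) := (pow_succ 1000 (m + 1)).symm
    calc rest + 1000 ^ (m + 1) * hi < 1000 ^ (m + 2) := step
      _ ≤ 1000 ^ 32 := Nat.pow_le_pow_right (by omega) (by omega)
  rw [altChars_shape _ u hx1 hx32, hdig]
  have hmap : List.map (fun g : Nat => (g : Int)) ((Nat.digits 1000 rest ++ List.replicate k 0) ++ [hi])
      = (((Nat.digits 1000 rest).map (fun g : Nat => (g : Int)) ++ List.replicate k (0 : Int)) ++ [(hi : Int)]) := by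
    simp
  rw [hmap]
  have hcond : (if 1 < (((Nat.digits 1000 rest).map (fun g : Nat => (g : Int)) ++ List.replicate k (0 : Int)) ++ [(hi : Int)]).length
      then PySem.List.pyGetD (((Nat.digits 1000 rest).map (fun g : Nat => (g : Int)) ++ List.replicate k (0 : Int)) ++ [(hi : Int)]) 1 0 ≠ 0
      else (u = true))
      ↔ PySem.List.pyGetD (((Nat.digits 1000 rest).map (fun g : Nat => (g : Int)) ++ List.replicate k (0 : Int)) ++ [(hi : Int)]) 1 0 ≠ 0 := by
    rw [if_pos (by simp; omega)]
  rw [partStep_congr _ _ hcond]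
  rw [PySem.List.enumerate_append, PySem.List.enumerate_cons, PySem.List.enumerate_nil,
    List.foldl_append, List.foldl_cons, List.foldl_nil]
  rw [PySem.List.enumerate_append, List.foldl_append]
  rw [fold_zeros]
  rw [show (0 + ((List.map (fun g : Nat => (g : Int)) (Nat.digits 1000 rest) ++ List.replicate k (0 : Int)).length : Int)) = ((L + k : Nat) : Int) from by simp [hLdef]]
  rw [partStep_big _ _ (L + k) _ (by omega) (by exact_mod_cast show hi ≠ 0 from by omega)]
  rw [show (((L + k : Nat) : Int)) - 1 = (m : Int) from by push_cast; omega]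
  rw [hpow.1]
  by_cases hr : rest = 0
  · subst hr
    rw [show ((0 : Nat) : Int) = (0 : Int) from rfl, altZero]
    simp only [Nat.digits_zero, List.map_nil, PySem.List.enumerate_nil, List.foldl_nil]
    rw [PySem.Chars.join_singleton, hA]
    rw [alphaSum_app, hpow.2]
    simp
  · -- rest ≥ 1
    have hL1 : 1 ≤ L := by
      have h := List.length_pos_of_ne_nil ((Nat.digits_ne_nil_iff_ne_zero (b := 1000)).2 hr)
      omega
    have hrest32 : rest < 1000 ^ 32 := by
      calc rest < 1000 ^ (m + 1) := h3
        _ ≤ 1000 ^ 32 := Nat.pow_le_pow_right (by omega) (by omega)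
    rw [altChars_shape rest (decide (m = 0)) (by omega) hrest32]
    have hiff : (PySem.List.pyGetD (List.map (fun g : Nat => (g : Int)) (Nat.digits 1000 rest) ++ List.replicate k (0 : Int) ++ [(hi : Int)]) 1 0 ≠ 0)
        ↔ (if 1 < ((Nat.digits 1000 rest).map (fun g : Nat => (g : Int))).length
           then PySem.List.pyGetD ((Nat.digits 1000 rest).map (fun g : Nat => (g : Int))) 1 0 ≠ 0
           else ((decide (m = 0)) = true)) := by
      by_cases hL2 : 2 ≤ L
      · rw [if_pos (by rw [List.length_map]; omega)]
        rw [PySem.List.pyGetD_ofNat', PySem.List.pyGetD_ofNat']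
        rw [List.getD_append ((Nat.digits 1000 rest).map (fun g : Nat => (g : Int)) ++ List.replicate k (0 : Int)) [(hi : Int)] 0 1 (by simp; omega)]
        rw [List.getD_append ((Nat.digits 1000 rest).map (fun g : Nat => (g : Int))) (List.replicate k (0 : Int)) 0 1 (by simp; omega)]
      · have hLeq : L = 1 := by omega
        have hrlt : rest < 1000 := by
          have h := (Nat.digits_length_le_iff (b := 1000) (k := 1) (by norm_num) rest).1 (by omega)
          simpa using h
        have hgr : Nat.digits 1000 rest = [rest] := digits_small (by omega) hrlt
        rw [if_neg (by simp [hgr])]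
        by_cases hm0 : m = 0
        · have hk0 : k = 0 := by omega
          subst hm0
          rw [hgr, hk0]
          simp only [List.map_cons, List.map_nil, List.replicate_zero, List.append_nil]
          rw [PySem.List.pyGetD_ofNat']
          simp [show hi ≠ 0 from by omega]
        · have hk : k = m := by omega
          obtain ⟨m', rfl⟩ : ∃ m', m = m' + 1 := ⟨m - 1, by omega⟩
          rw [hgr, hk]
          simp only [List.map_cons, List.map_nil, List.replicate_succ]
          rw [PySem.List.pyGetD_ofNat']
          simp
    rw [partStep_congr _ _ hiff]
    have hbounds : ∀ p ∈ PySem.List.enumerate ((Nat.digits 1000 rest).map (fun g : Nat => (g : Int))) 0,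
        0 ≤ p.2 ∧ p.2 < 1000 := by
      intro p hp
      obtain ⟨g, hg, hpg⟩ := List.mem_map.1 (enum_snd_mem hp)
      have := Nat.digits_lt_base (by norm_num) hg
      omega
    obtain ⟨new, hfold, hemp, hhead⟩ := fold_shape
      (if 1 < ((Nat.digits 1000 rest).map (fun g : Nat => (g : Int))).length
       then PySem.List.pyGetD ((Nat.digits 1000 rest).map (fun g : Nat => (g : Int))) 1 0 ≠ 0
       else ((decide (m = 0)) = true))
      (PySem.List.enumerate ((Nat.digits 1000 rest).map (fun g : Nat => (g : Int))) 0) [] hbounds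
    rw [List.append_nil] at hfold
    rw [hfold]
    have hne : new ≠ [] := by
      intro hnew
      have hall := hemp.1 hnew
      have hnil := (Nat.digits_ne_nil_iff_ne_zero (b := 1000)).2 hr
      have hlast := Nat.getLast_digit_ne_zero 1000 hr
      have hmem : ((Nat.digits 1000 rest).getLast hnil : Int)
          ∈ (Nat.digits 1000 rest).map (fun g : Nat => (g : Int)) :=
        List.mem_map_of_mem (List.getLast_mem hnil)
      rw [← PySem.List.map_snd_enumerate ((Nat.digits 1000 rest).map (fun g : Nat => (g : Int))) 0] at hmem
      obtain ⟨p, hp, hp2⟩ := List.mem_map.1 hmem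
      rw [hall p hp] at hp2
      exact hlast (by exact_mod_cast hp2.symm)
    rcases new with _ | ⟨q, qs⟩
    · exact absurd rfl hne
    obtain ⟨hqz, hqne⟩ := hhead q List.mem_cons_self
    have hzero : PySem.Chars.join [',', ' '] (q :: qs) ≠ ['z', 'e', 'r', 'o'] :=
      join_ne_zero hqne hqz
    rw [if_neg hzero, if_neg hzero, hA, PySem.Chars.join_cons_cons]
    simp only [Prod.mk.injEq]
    constructor
    · rw [alphaSum_app, alphaSum_app, alphaSum_app, sepAlpha, hpow.2]
      ring
    · simp [List.append_assoc]

-- ---- A-side unfolding ----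

theorem toChars_natCast (n : Nat) : PySem.Int.toChars (↑n) = Nat.toDigits 10 n := by
  simp [PySem.Int.toChars]

theorem unfold_small (f : Nat) (x : Int) (u : Bool) (h0 : 0 ≤ x) (h : x < 100) :
    lettersinFuel (f + 1) x u = lettersinFuel 1 x u := by
  simp only [lettersinFuel]
  split_ifs <;> first | rfl | omega

theorem val1 : ∀ k : Nat, k < 10 → pyIntDigits [Nat.digitChar k] = (↑k : Int) := by
  decide

theorem val2 : ∀ a : Nat, a < 10 → ∀ b : Nat, b < 10 →
    pyIntDigits [Nat.digitChar a, Nat.digitChar b] = (↑(10 * a + b) : Int) := by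
  decide

theorem unfold_mid (f : Nat) (n : Nat) (u : Bool) (h1 : 100 ≤ n) (h2 : n < 1000) :
    lettersinFuel (f + 1) (↑n) u =
      (let a := lettersinFuel f (↑(n / 100)) true
       let b := lettersinFuel f (↑(n % 100)) true
       if b.2 = ['z', 'e', 'r', 'o'] then (a.1 + hundredA, a.2 ++ ' ' :: hundredwordA)
       else (a.1 + hundredA + (if u then 3 else 0) + b.1,
             a.2 ++ ' ' :: hundredwordA ++ (if u then [' ', 'a', 'n', 'd', ' '] else [' ']) ++ b.2)) := by
  have hD : Nat.toDigits 10 n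
      = [Nat.digitChar (n / 100), Nat.digitChar (n / 10 % 10), Nat.digitChar (n % 10)] := by
    rw [D_step (by omega), D_step (by omega), Nat.div_div_eq_div_mul,
      D_lt10 (by omega : n / (10 * 10) < 10)]
    norm_num
  have hc0 : ¬((n : Int) = 0) := by omega
  have hc1 : ¬((n : Int) < 10) := by omega
  have hc2 : ¬((n : Int) < 20) := by omega
  have hc3 : ¬((n : Int) < 100) := by omega
  have hc4 : ((n : Int) < 1000) := by omega
  simp only [lettersinFuel, hc0, hc1, hc2, hc3, hc4, if_false, if_true, toChars_natCast, hD]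
  rw [show PySem.List.pyGet? [Nat.digitChar (n / 100), Nat.digitChar (n / 10 % 10), Nat.digitChar (n % 10)] 0
      = some (Nat.digitChar (n / 100)) from PySem.List.pyGet?_zero_cons _ _]
  rw [PySem.List.slice_from_one]
  simp only [List.tail_cons]
  rw [val1 (n / 100) (by omega)]
  rw [val2 (n / 10 % 10) (by omega) (n % 10) (by omega)]
  rw [show 10 * (n / 10 % 10) + n % 10 = n % 100 from by omega]

theorem valN_replicate_zero : ∀ p : Nat, valN (List.replicate p '0') = 0 := by
  intro p
  induction p with
  | zero => rfl
  | succ p ih =>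
    rw [List.replicate_succ]
    show (List.replicate p '0').foldl _ (0 * 10 + ('0'.toNat - 48)) = 0
    rw [show 0 * 10 + ('0'.toNat - 48) = 0 from by decide]
    exact ih

theorem valN_pad (p : Nat) (l : List Char) : valN (List.replicate p '0' ++ l) = valN l := by
  rw [valN_append, valN_replicate_zero]
  simp

theorem powGet : ∀ j : Nat, j < 4 →
    PySem.List.pyGet? powersofthousandA (↑j) = some (PySem.List.pyGetD powersofthousandA (↑j) 0) ∧
    PySem.List.pyGet? powersofthousandwordsA (↑j)
      = some (PySem.List.pyGetD powersofthousandwordsA (↑j) []) := by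
  decide

theorem unfold_big (f : Nat) (n : Nat) (u : Bool) (h1 : 1000 ≤ n) (h2 : n ≤ 2 ^ 31) :
    lettersinFuel (f + 1) (↑n) u =
      (let G := (Nat.log 10 n + 3) / 3
       let a := lettersinFuel f (↑(n / 10 ^ (3 * (G - 1)))) false
       let b := lettersinFuel f (↑(n % 10 ^ (3 * (G - 1)))) (decide (G = 2))
       (a.1 + PySem.List.pyGetD powersofthousandA (↑(G - 2)) 0 +
          (if b.2 = ['z', 'e', 'r', 'o'] then 0 else b.1),
        a.2 ++ ' ' :: PySem.List.pyGetD powersofthousandwordsA (↑(G - 2)) [] ++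
          (if b.2 = ['z', 'e', 'r', 'o'] then [] else ',' :: ' ' :: b.2))) := by
  have hlg3 : 3 ≤ Nat.log 10 n :=
    (Nat.pow_le_iff_le_log (by omega) (by omega)).1 (by norm_num; omega)
  have hlg9 : Nat.log 10 n ≤ 9 := by
    have := (Nat.log_lt_iff_lt_pow (b := 10) (x := 10) (by omega) (by omega : n ≠ 0)).2
      (by norm_num; omega)
    omega
  set lg := Nat.log 10 n with hlgdef
  set p : Nat := (3 - (lg + 1) % 3) % 3 with hpdef
  set G : Nat := (lg + 3) / 3 with hGdef
  have hGeq : (Nat.log 10 n + 3) / 3 = G := by rw [hGdef]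
  have hG2 : 2 ≤ G := by omega
  have hG4 : G ≤ 4 := by omega
  have hp3 : p < 3 := by omega
  have hsum : p + (lg + 1) = 3 * G := by omega
  -- branch selection
  have hc0 : ¬((n : Int) = 0) := by omega
  have hc1 : ¬((n : Int) < 10) := by omega
  have hc2 : ¬((n : Int) < 20) := by omega
  have hc3 : ¬((n : Int) < 100) := by omega
  have hc4 : ¬((n : Int) < 1000) := by omega
  simp only [lettersinFuel, hc0, hc1, hc2, hc3, hc4, if_false, toChars_natCast]
  -- the padded string
  have hmod : PySem.Int.mod (((Nat.toDigits 10 n).length : Nat) : Int) 3 = ↑((lg + 1) % 3) := by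
    rw [len_D]
    exact_mod_cast PySem.Int.mod_natCast (lg + 1) 3
  have hpad : (if PySem.Int.mod (((Nat.toDigits 10 n).length : Nat) : Int) 3 ≠ 0
      then PySem.List.pyRepeat ['0'] (3 - PySem.Int.mod (((Nat.toDigits 10 n).length : Nat) : Int) 3) ++ Nat.toDigits 10 n
      else Nat.toDigits 10 n)
      = List.replicate p '0' ++ Nat.toDigits 10 n := by
    rw [hmod]
    by_cases hdm : (lg + 1) % 3 = 0
    · rw [if_neg (by simp [hdm])]
      rw [show p = 0 from by omega]
      simp
    · rw [if_pos (by exact_mod_cast hdm)]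
      rw [PySem.List.pyRepeat_singleton]
      congr 1
      rw [show ((3 : Int) - ↑((lg + 1) % 3)).toNat = p from by omega]
  rw [hpad]
  -- magnitude
  have hlen : ((List.replicate p '0' ++ Nat.toDigits 10 n).length : Nat) = 3 * G := by
    rw [List.length_append, List.length_replicate, len_D]
    omega
  have hmag : PySem.Int.floordiv (((List.replicate p '0' ++ Nat.toDigits 10 n).length : Nat) : Int) 3 - 2
      = ((G - 2 : Nat) : Int) := by
    rw [hlen]
    rw [show PySem.Int.floordiv ((3 * G : Nat) : Int) 3 = ((3 * G / 3 : Nat) : Int) from by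
      exact_mod_cast PySem.Int.floordiv_natCast (3 * G) 3]
    push_cast
    omega
  rw [hmag]
  -- the two slices and their values
  have hsliceA : PySem.List.slice (List.replicate p '0' ++ Nat.toDigits 10 n) none (some 3)
      = List.replicate p '0' ++ (Nat.toDigits 10 n).take (3 - p) := by
    rw [PySem.List.slice_to _ (by norm_num)]
    rw [show ((3 : Int)).toNat = 3 from rfl]
    rw [List.take_append, List.take_replicate, List.length_replicate]
    rw [show min 3 p = p from by omega]
  have hsliceB : PySem.List.slice (List.replicate p '0' ++ Nat.toDigits 10 n) (some 3) none
      = (Nat.toDigits 10 n).drop (3 - p) := by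
    rw [PySem.List.slice_from _ (by norm_num)]
    rw [show ((3 : Int)).toNat = 3 from rfl]
    rw [List.drop_append, List.drop_replicate, List.length_replicate]
    rw [show p - 3 = 0 from by omega]
    simp
  have hdlen : 3 - p ≤ (Nat.toDigits 10 n).length := by rw [len_D]; omega
  have hd := D_split (n := n) hdlen
  have hexp : (Nat.toDigits 10 n).length - (3 - p) = 3 * (G - 1) := by rw [len_D]; omega
  have hvalA : pyIntDigits (List.replicate p '0' ++ (Nat.toDigits 10 n).take (3 - p))
      = ((n / 10 ^ (3 * (G - 1)) : Nat) : Int) := by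
    rw [pyIntDigits_eq_valN _ (by
      intro c hc
      rcases List.mem_append.1 hc with h | h
      · rw [List.eq_of_mem_replicate h]; decide
      · exact (D_digits c (List.mem_of_mem_take h)).1)]
    rw [valN_pad, hd.1, hexp]
  have hvalB : pyIntDigits ((Nat.toDigits 10 n).drop (3 - p))
      = ((n % 10 ^ (3 * (G - 1)) : Nat) : Int) := by
    rw [pyIntDigits_eq_valN _ (fun c hc => (D_digits c (List.mem_of_mem_drop hc)).1)]
    rw [hd.2, hexp]
  rw [hsliceA, hsliceB, hvalA, hvalB]
  -- the power-of-thousand lookups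
  rw [(powGet (G - 2) (by omega)).1, (powGet (G - 2) (by omega)).2]
  -- the 'and' flag
  rw [show (decide (((G - 2 : Nat) : Int) = 0)) = decide (G = 2) from
    decide_eq_decide.2 (by omega)]

set_option maxHeartbeats 4000000 in
set_option maxRecDepth 100000 in
theorem HsmallG : ∀ n : Nat, n < 100 → ∀ u : Bool,
    lettersinFuel 1 (↑n) u = altChars (↑n) u := by
  decide

set_option maxHeartbeats 4000000 in
set_option maxRecDepth 100000 in
theorem HmidG : ∀ n : Nat, n < 1000 → 100 ≤ n → ∀ u : Bool,
    (let a := ((alphaSum (groupB (↑(n / 100)) true), groupB (↑(n / 100)) true) : Int × List Char)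
     let b := if n % 100 = 0 then ((4 : Int), ['z', 'e', 'r', 'o'])
              else (alphaSum (groupB (↑(n % 100)) true), groupB (↑(n % 100)) true)
     if b.2 = ['z', 'e', 'r', 'o'] then (a.1 + hundredA, a.2 ++ ' ' :: hundredwordA)
     else (a.1 + hundredA + (if u then 3 else 0) + b.1,
           a.2 ++ ' ' :: hundredwordA ++ (if u then [' ', 'a', 'n', 'd', ' '] else [' ']) ++ b.2))
    = (alphaSum (groupB (↑n) u), groupB (↑n) u) := by
  decide

theorem main_lemma : ∀ n : Nat, n ≤ 2 ^ 31 → ∀ (u : Bool) (f : Nat),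
    ((n < 100 ∧ 1 ≤ f) ∨ (2 ≤ f ∧ n < 1000 ^ (f - 1))) →
    lettersinFuel f (↑n) u = altChars (↑n) u := by
  intro n
  induction n using Nat.strong_induction_on with
  | _ n IH =>
    intro hn u f hf
    by_cases h100 : n < 100
    · have hf1 : 1 ≤ f := by rcases hf with ⟨_, h⟩ | ⟨h, _⟩ <;> omega
      obtain ⟨f', rfl⟩ : ∃ f', f = f' + 1 := ⟨f - 1, by omega⟩
      rw [unfold_small f' _ u (by omega) (by exact_mod_cast h100)]
      exact HsmallG n h100 u
    · have hf2 : 2 ≤ f ∧ n < 1000 ^ (f - 1) := by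
        rcases hf with ⟨h, _⟩ | h
        · omega
        · exact h
      obtain ⟨f', rfl⟩ : ∃ f', f = f' + 1 := ⟨f - 1, by omega⟩
      have hfe : f' + 1 - 1 = f' := by omega
      rw [hfe] at hf2
      by_cases h1000 : n < 1000
      · rw [unfold_mid f' n u (by omega) h1000]
        rw [IH (n / 100) (by omega) (by omega) true f' (Or.inl ⟨by omega, by omega⟩)]
        rw [IH (n % 100) (by omega) (by omega) true f' (Or.inl ⟨by omega, by omega⟩)]
        rw [altSmall (n / 100) (by omega) (by omega) true]
        rw [altSmall n h1000 (by omega) u]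
        have hmid := HmidG n h1000 (by omega) u
        by_cases hz : n % 100 = 0
        · rw [if_pos hz] at hmid
          rw [hz]
          rw [show ((0 : Nat) : Int) = (0 : Int) from rfl, altZero]
          exact hmid
        · rw [if_neg hz] at hmid
          rw [altSmall (n % 100) (by omega) (by omega) true]
          exact hmid
      · -- n ≥ 1000
        have hf3 : 2 ≤ f' := by
          by_contra hcon
          have hfo : f' = 1 := by omega
          rw [hfo] at hf2
          simp at hf2
          omega
        rw [unfold_big f' n u (by omega) hn]
        dsimp only
        have hlg3 : 3 ≤ Nat.log 10 n :=
          (Nat.pow_le_iff_le_log (by omega) (by omega)).1 (by norm_num; omega)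
        have hlg9 : Nat.log 10 n ≤ 9 := by
          have := (Nat.log_lt_iff_lt_pow (b := 10) (x := 10) (by omega) (by omega : n ≠ 0)).2
            (by norm_num; omega)
          omega
        set lg := Nat.log 10 n with hlgdef
        set G : Nat := (Nat.log 10 n + 3) / 3 with hGdef
        have hG2 : 2 ≤ G := by omega
        have hG4 : G ≤ 4 := by omega
        have hKlg : 3 * (G - 1) ≤ lg := by omega
        have hpow10 : (10 : Nat) ^ (3 * (G - 1)) ≤ n := by
          calc (10 : Nat) ^ (3 * (G - 1)) ≤ 10 ^ lg := Nat.pow_le_pow_right (by omega) hKlg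
            _ ≤ n := Nat.pow_log_le_self 10 (by omega)
        have hnlt : n < 1000 * 10 ^ (3 * (G - 1)) := by
          have hx : n < 10 ^ (lg + 1) := (Nat.log_lt_iff_lt_pow (by omega) (by omega)).1 (by omega)
          calc n < 10 ^ (lg + 1) := hx
            _ ≤ 10 ^ (3 * (G - 1) + 3) := Nat.pow_le_pow_right (by omega) (by omega)
            _ = 1000 * 10 ^ (3 * (G - 1)) := by rw [pow_add]; ring
        set K : Nat := 10 ^ (3 * (G - 1)) with hKdef
        have hK0 : 0 < K := Nat.pow_pos (by omega)
        have hhi1 : 1 ≤ n / K := Nat.one_le_div_iff hK0 |>.2 hpow10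
        have hhi2 : n / K < 1000 := Nat.div_lt_iff_lt_mul hK0 |>.2 hnlt
        have hrlt : n % K < K := Nat.mod_lt _ hK0
        have h1000K : (1000 : Nat) ^ (G - 2 + 1) = K := by
          rw [hKdef, show (1000 : Nat) = 10 ^ 3 from by norm_num, ← pow_mul]
          congr 1
          omega
        -- recursive calls
        rw [IH (n / K) (by
            calc n / K < 1000 := hhi2
              _ ≤ n := by omega) (by omega) false f'
          (Or.inr ⟨hf3, by
            calc n / K < 1000 := hhi2
              _ = 1000 ^ 1 := (pow_one 1000).symm
              _ ≤ 1000 ^ (f' - 1) := Nat.pow_le_pow_right (by omega) (by omega)⟩)]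
        rw [IH (n % K) (by
            calc n % K < K := hrlt
              _ ≤ n := hpow10) (by omega) (decide (G = 2)) f'
          (Or.inr ⟨hf3, by
            have hGf : G ≤ f' := by
              by_contra hcon
              have hle : 1000 ^ f' ≤ 1000 ^ (G - 2 + 1) :=
                Nat.pow_le_pow_right (by omega) (by omega)
              rw [h1000K] at hle
              omega
            calc n % K < K := hrlt
              _ = 1000 ^ (G - 2 + 1) := h1000K.symm
              _ ≤ 1000 ^ (f' - 1) := Nat.pow_le_pow_right (by omega) (by omega)⟩)]
        -- align flags and apply the B-side step lemma
        rw [show (decide (G = 2)) = decide (G - 2 = 0) from decide_eq_decide.2 (by omega)]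
        have hbig := Hbig (G - 2) (n / K) (n % K) u (by omega) hhi1 hhi2 (by rw [h1000K]; exact hrlt)
        rw [h1000K] at hbig
        rw [show n % K + K * (n / K) = n from Nat.mod_add_div n K] at hbig
        exact hbig

-- ===== VERDICT (by name: the statement is the Claim_ definition above) =====
theorem lettersin_spec : Claim_equal_lettersin := by
  intro x u hdom hpre
  have hx0 : 0 ≤ x := hpre
  obtain ⟨n, rfl⟩ : ∃ n : Nat, x = (↑n : Int) := ⟨x.toNat, by omega⟩
  have hn : n ≤ 2 ^ 31 := by
    have := hdom
    unfold Dom_lettersin pvDomInt at this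
    simp only [decide_eq_true_eq] at this
    omega
  show lettersin (↑n) u = lettersin_alt (↑n) u
  have hmain := main_lemma n hn u 32 (Or.inr ⟨by omega, by
    calc n ≤ 2 ^ 31 := hn
      _ < 1000 ^ (32 - 1) := by norm_num⟩)
  rw [alt_eq]
  simp only [lettersin]
  rw [hmain]
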